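-- pv_equiv track=rewrite | github.com/FirstGameGG/PythonProg | Codes/Mixname.py | mixname
-- ===== SOURCE A (Python) =====
-- def mixname(t1, t2):
--     vowels = 'aeiou'
--     count = 0
--     newt1 = ''
--     newt2 = ''
--     isFinished1 = False
--     isFinished2 = False
--     for i in t1:
--         if i in vowels:
--             count += 1
--
--         if count < 2:
--             newt1 += i
--         else:
--             isFinished1 = True
--     if isFinished1 == False: newt1 = t1
--     count = 0
--     for i in t2:
--         if count >= 1:
--             newt2 += i
--             isFinished2 = True
--         if i in vowels:
--             count += 1
--     if isFinished2 == False: newt2 = t2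
--     newname = newt1 + newt2
--     return newname
-- ===== SOURCE B (Python) =====
-- def mixname(t1, t2):
--     vowels = 'aeiou'
--     pos1 = [i for i, c in enumerate(t1) if c in vowels]
--     newt1 = t1[:pos1[1]] if len(pos1) >= 2 else t1
--     pos2 = [i for i, c in enumerate(t2) if c in vowels]
--     newt2 = t2[pos2[0] + 1:] if pos2 and pos2[0] + 1 < len(t2) else t2
--     return newt1 + newt2
-- ===== Notes on version B (the rewrite author's own statement) =====
-- stated objective: simpler
-- what changed: Replaces A's two stateful character loops with flag/counter/accumulator variables by collecting each string's vowel indices once and slicing: t1 up to its second vowel, t2 after its first vowel (whole t2 if that slice would be empty).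
import Mathlib
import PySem

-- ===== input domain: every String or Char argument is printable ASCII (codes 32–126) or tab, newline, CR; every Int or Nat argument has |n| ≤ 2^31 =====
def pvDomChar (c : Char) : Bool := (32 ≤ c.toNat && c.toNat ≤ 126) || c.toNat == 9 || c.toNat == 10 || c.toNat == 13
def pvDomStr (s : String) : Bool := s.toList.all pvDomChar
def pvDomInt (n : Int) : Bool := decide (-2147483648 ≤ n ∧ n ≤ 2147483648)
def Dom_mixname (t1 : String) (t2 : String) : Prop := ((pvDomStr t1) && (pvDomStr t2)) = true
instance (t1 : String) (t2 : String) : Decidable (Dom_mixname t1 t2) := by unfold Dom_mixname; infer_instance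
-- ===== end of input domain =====

-- B collects vowel indices once and slices, instead of A's two stateful loops; objective: simpler.

-- ===== PORT A =====
def mixIsVowel (c : Char) : Bool := "aeiou".toList.contains c

def mixloop1 : List Char → Int → List Char → Bool → (List Char × Bool)
  | [], _, acc, fin => (acc, fin)
  | c :: rest, cnt, acc, fin =>
    let cnt' := if mixIsVowel c then cnt + 1 else cnt
    if cnt' < 2 then mixloop1 rest cnt' (acc ++ [c]) fin
    else mixloop1 rest cnt' acc true

def mixloop2 : List Char → Int → List Char → Bool → (List Char × Bool)
  | [], _, acc, fin => (acc, fin)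
  | c :: rest, cnt, acc, fin =>
    let acc' := if cnt ≥ 1 then acc ++ [c] else acc
    let fin' := if cnt ≥ 1 then true else fin
    let cnt' := if mixIsVowel c then cnt + 1 else cnt
    mixloop2 rest cnt' acc' fin'

def mixname (t1 : String) (t2 : String) : String :=
  let l1 := t1.toList
  let l2 := t2.toList
  let r1 := mixloop1 l1 0 [] false
  let newt1 := if r1.2 = false then l1 else r1.1
  let r2 := mixloop2 l2 0 [] false
  let newt2 := if r2.2 = false then l2 else r2.1
  String.ofList (newt1 ++ newt2)

-- ===== PORT B =====
-- pos = [i for i, c in enumerate(t) if c in vowels]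
def mixVpos (l : List Char) (s : Int) : List Int :=
  ((PySem.List.enumerate l s).filter (fun p => mixIsVowel p.2)).map (·.1)

def mixname_alt (t1 : String) (t2 : String) : String :=
  let l1 := t1.toList
  let l2 := t2.toList
  let pos1 := mixVpos l1 0
  let newt1 := if h : 2 ≤ pos1.length then PySem.List.slice l1 none (some pos1[1]) else l1
  let pos2 := mixVpos l2 0
  let newt2 := match pos2 with
    | p :: _ => if p + 1 < (l2.length : Int) then PySem.List.slice l2 (some (p + 1)) none else l2
    | [] => l2
  String.ofList (newt1 ++ newt2)

-- ===== PRECONDITION & SPEC =====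
def Spec_mixname (t1 : String) (t2 : String) (out : String) : Prop := out = mixname_alt t1 t2
instance (t1 : String) (t2 : String) (out : String) : Decidable (Spec_mixname t1 t2 out) := by unfold Spec_mixname; infer_instance

-- ===== CLAIM (what is proved, stated in full; the proofs are below) =====
def Claim_equal_mixname : Prop := ∀ (t1 : String) (t2 : String), Dom_mixname t1 t2 → Spec_mixname t1 t2 (mixname t1 t2)

-- ===== LEMMAS AND PROOFS =====

lemma mixVpos_nil (s : Int) : mixVpos [] s = [] := rfl

lemma mixVpos_cons (c : Char) (l : List Char) (s : Int) :
    mixVpos (c :: l) s = (if mixIsVowel c then [s] else []) ++ mixVpos l (s + 1) := by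
  simp [mixVpos, PySem.List.enumerate_cons, List.filter_cons]
  split <;> simp

lemma mixVpos_mem {l : List Char} {s j : Int} (h : j ∈ mixVpos l s) :
    ∃ k : Nat, k < l.length ∧ j = s + k := by
  simp only [mixVpos, List.mem_map, List.mem_filter] at h
  obtain ⟨p, ⟨hp, _⟩, rfl⟩ := h
  rw [PySem.List.mem_enumerate_iff] at hp
  obtain ⟨k, hk, rfl⟩ := hp
  exact ⟨k, hk, rfl⟩

lemma mixloop1_ge2 (l : List Char) (cnt : Int) (acc : List Char) (h : 2 ≤ cnt) :
    mixloop1 l cnt acc true = (acc, true) := by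
  induction l generalizing cnt with
  | nil => rfl
  | cons c rest ih =>
    cases hv : mixIsVowel c <;>
      simp only [mixloop1, hv, Bool.false_eq_true, if_false, if_true] <;>
      rw [if_neg (by omega)] <;>
      exact ih _ (by omega)

lemma mixloop1_one (l : List Char) (s : Int) (acc : List Char) (fin : Bool) :
    mixloop1 l 1 acc fin =
      match mixVpos l s with
      | j :: _ => (acc ++ l.take (j - s).toNat, true)
      | [] => (acc ++ l, fin) := by
  induction l generalizing s acc fin with
  | nil => simp [mixloop1, mixVpos_nil]
  | cons c rest ih =>
    rw [mixVpos_cons]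
    cases hv : mixIsVowel c
    · simp only [mixloop1, hv, Bool.false_eq_true, if_false, List.nil_append]
      rw [if_pos (by norm_num), ih (s + 1)]
      cases hvp : mixVpos rest (s + 1) with
      | nil => simp
      | cons j tl =>
        have hj : j ∈ mixVpos rest (s + 1) := by rw [hvp]; exact List.mem_cons_self ..
        obtain ⟨k, _, rfl⟩ := mixVpos_mem hj
        have h3 : (s + 1 + (k : Int) - s).toNat = (s + 1 + (k : Int) - (s + 1)).toNat + 1 := by omega
        simp [h3]
    · simp only [mixloop1, hv, if_true]
      rw [if_neg (by norm_num), mixloop1_ge2 _ _ _ (by norm_num)]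
      simp

lemma mixloop1_zero (l : List Char) (s : Int) (acc : List Char) (fin : Bool) :
    mixloop1 l 0 acc fin =
      match mixVpos l s with
      | _ :: j :: _ => (acc ++ l.take (j - s).toNat, true)
      | _ => (acc ++ l, fin) := by
  induction l generalizing s acc fin with
  | nil => simp [mixloop1, mixVpos_nil]
  | cons c rest ih =>
    rw [mixVpos_cons]
    cases hv : mixIsVowel c
    · simp only [mixloop1, hv, Bool.false_eq_true, if_false, List.nil_append]
      rw [if_pos (by norm_num), ih (s + 1)]
      cases hvp : mixVpos rest (s + 1) with
      | nil => simp
      | cons j tl =>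
        cases tl with
        | nil => simp
        | cons j2 tl2 =>
          have hj2 : j2 ∈ mixVpos rest (s + 1) := by
            rw [hvp]; exact List.mem_cons_of_mem _ (List.mem_cons_self ..)
          obtain ⟨k, _, rfl⟩ := mixVpos_mem hj2
          have h3 : (s + 1 + (k : Int) - s).toNat = (s + 1 + (k : Int) - (s + 1)).toNat + 1 := by omega
          simp [h3]
    · simp only [mixloop1, hv, if_true]
      rw [if_pos (by norm_num), show ((0 : Int) + 1) = 1 from by norm_num, mixloop1_one _ (s + 1)]
      cases hvp : mixVpos rest (s + 1) with
      | nil => simp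
      | cons j tl =>
        have hj : j ∈ mixVpos rest (s + 1) := by rw [hvp]; exact List.mem_cons_self ..
        obtain ⟨k, _, rfl⟩ := mixVpos_mem hj
        have h3 : (s + 1 + (k : Int) - s).toNat = (s + 1 + (k : Int) - (s + 1)).toNat + 1 := by omega
        simp [h3]

lemma mixloop2_ge1 (l : List Char) (cnt : Int) (acc : List Char) (h : 1 ≤ cnt) :
    mixloop2 l cnt acc true = (acc ++ l, true) := by
  induction l generalizing cnt acc with
  | nil => simp [mixloop2]
  | cons c rest ih =>
    have h1 : cnt ≥ 1 := h
    cases hv : mixIsVowel c <;>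
      simp only [mixloop2, hv, Bool.false_eq_true, if_false, if_true, if_pos h1] <;>
      rw [ih _ _ (by omega)] <;> simp

lemma mixloop2_one (l : List Char) (acc : List Char) :
    mixloop2 l 1 acc false = if l = [] then (acc, false) else (acc ++ l, true) := by
  cases l with
  | nil => rfl
  | cons c rest =>
    have h1 : (1 : Int) ≥ 1 := by norm_num
    cases hv : mixIsVowel c <;>
      simp only [mixloop2, hv, Bool.false_eq_true, if_false, if_true, if_pos h1] <;>
      rw [mixloop2_ge1 _ _ _ (by norm_num)] <;> simp

lemma mixloop2_zero (l : List Char) (s : Int) (acc : List Char) :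
    mixloop2 l 0 acc false =
      match mixVpos l s with
      | j :: _ =>
        if l.drop ((j - s).toNat + 1) = [] then (acc, false)
        else (acc ++ l.drop ((j - s).toNat + 1), true)
      | [] => (acc, false) := by
  induction l generalizing s acc with
  | nil => simp [mixloop2, mixVpos_nil]
  | cons c rest ih =>
    rw [mixVpos_cons]
    have h0 : ¬ ((0 : Int) ≥ 1) := by norm_num
    cases hv : mixIsVowel c
    · simp only [mixloop2, hv, Bool.false_eq_true, if_false, if_neg h0, List.nil_append]
      rw [ih (s + 1)]
      cases hvp : mixVpos rest (s + 1) with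
      | nil => simp
      | cons j tl =>
        have hj : j ∈ mixVpos rest (s + 1) := by rw [hvp]; exact List.mem_cons_self ..
        obtain ⟨k, _, rfl⟩ := mixVpos_mem hj
        have h3 : (s + 1 + (k : Int) - s).toNat = (s + 1 + (k : Int) - (s + 1)).toNat + 1 := by omega
        simp [h3]
    · simp only [mixloop2, hv, if_true, if_neg h0]
      rw [show ((0 : Int) + 1) = 1 from by norm_num, mixloop2_one]
      simp

-- ===== VERDICT (by name: the statement is the Claim_ definition above) =====
theorem mixname_spec : Claim_equal_mixname := by
  intro t1 t2 _
  unfold Spec_mixname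
  show String.ofList _ = String.ofList _
  congr 1
  rw [mixloop1_zero _ 0, mixloop2_zero _ 0]
  congr 1
  · -- first halves agree
    cases hvp : mixVpos t1.toList 0 with
    | nil => simp
    | cons j tl =>
      cases tl with
      | nil => simp
      | cons j2 tl2 =>
        have hj2 : j2 ∈ mixVpos t1.toList 0 := by
          rw [hvp]; exact List.mem_cons_of_mem _ (List.mem_cons_self ..)
        obtain ⟨k, _, rfl⟩ := mixVpos_mem hj2
        simp
  · -- second halves agree
    cases hvp : mixVpos t2.toList 0 with
    | nil => simp
    | cons j tl =>
      have hj : j ∈ mixVpos t2.toList 0 := by rw [hvp]; exact List.mem_cons_self ..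
      obtain ⟨k, hk, rfl⟩ := mixVpos_mem hj
      have h5 : t2.toList.length = t2.length := by simp
      by_cases hd : t2.toList.drop (k + 1) = []
      · have hnlt : ¬ ((k : Int) + 1 < (t2.length : Int)) := by
          have := List.drop_eq_nil_iff.mp hd; omega
        simp [hd, hnlt]
      · have hlt : (k : Int) + 1 < (t2.length : Int) := by
          have : ¬ t2.toList.length ≤ k + 1 := fun h => hd (List.drop_eq_nil_iff.mpr h)
          omega
        have h6 : ((k : Int) + 1).toNat = k + 1 := by omega
        simp [hd, hlt, PySem.List.slice_from _ (show (0 : Int) ≤ (k : Int) + 1 from by omega), h6]
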